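-- pv_equiv track=rewrite | github.com/jso122-2/Thinkerbell_prod | tb_dataset/preamble_validator.py | _validate_industry_platform_match
-- ===== SOURCE A (Python) =====
-- from typing import Dict, List, Tuple, Any
--
-- def _validate_industry_platform_match(industry: str, platforms: List[str]) -> List[str]:
--     """Validate industry matches appropriate social media platforms."""
--     issues = []
--
--     if not platforms:
--         issues.append("At least one platform must be specified")
--         return issues
--
--     # Convert platforms to lowercase for comparison
--     platforms_lower = [p.lower() for p in platforms]
--
--     # Industry-platform compatibility rules
--     industry_platform_rules = {
--         'fashion': {
--             'preferred': ['instagram', 'tiktok', 'pinterest'],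
--             'acceptable': ['facebook', 'youtube', 'twitter'],
--             'poor_fit': ['linkedin']
--         },
--         'food': {
--             'preferred': ['instagram', 'tiktok', 'youtube'],
--             'acceptable': ['facebook', 'pinterest', 'twitter'],
--             'poor_fit': ['linkedin']
--         },
--         'tech': {
--             'preferred': ['youtube', 'twitter', 'linkedin'],
--             'acceptable': ['instagram', 'tiktok', 'facebook'],
--             'poor_fit': ['pinterest']
--         },
--         'beauty': {
--             'preferred': ['instagram', 'tiktok', 'youtube'],
--             'acceptable': ['pinterest', 'facebook', 'twitter'],
--             'poor_fit': ['linkedin']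
--         },
--         'home': {
--             'preferred': ['instagram', 'pinterest', 'youtube'],
--             'acceptable': ['facebook', 'tiktok', 'twitter'],
--             'poor_fit': ['linkedin']
--         },
--         'travel': {
--             'preferred': ['instagram', 'youtube', 'tiktok'],
--             'acceptable': ['facebook', 'pinterest', 'twitter'],
--             'poor_fit': ['linkedin']
--         },
--         'finance': {
--             'preferred': ['linkedin', 'youtube', 'twitter'],
--             'acceptable': ['facebook', 'instagram'],
--             'poor_fit': ['tiktok', 'pinterest']
--         }
--     }
--
--     if industry in industry_platform_rules:
--         rules = industry_platform_rules[industry]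
--
--         # Check for poor platform fits
--         poor_platforms = [p for p in platforms_lower if p in rules['poor_fit']]
--         if poor_platforms:
--             issues.append(f"Platform(s) {poor_platforms} are poor fit for {industry} industry")
--
--         # Check if all platforms are suboptimal
--         preferred_platforms = [p for p in platforms_lower if p in rules['preferred']]
--         acceptable_platforms = [p for p in platforms_lower if p in rules['acceptable']]
--
--         if not preferred_platforms and not acceptable_platforms:
--             issues.append(f"No suitable platforms for {industry} industry. Consider: {rules['preferred']}")
--
--     # Platform-specific validation
--     if 'linkedin' in platforms_lower and industry not in ['tech', 'finance', 'business']: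
--         issues.append("LinkedIn typically not effective for consumer-focused industries")
--
--     if 'tiktok' in platforms_lower and industry == 'finance':
--         issues.append("TikTok generally not suitable for financial services content")
--
--     return issues
-- ===== SOURCE B (Python) =====
-- from typing import List
--
-- # Inverted index: platform -> {industry: category}. Replaces the per-industry
-- # rule lists and their membership scans by one dict lookup per platform.
-- _PLATFORM_CATEGORY = {
--     'instagram': {'fashion': 'preferred', 'food': 'preferred', 'tech': 'acceptable',
--                   'beauty': 'preferred', 'home': 'preferred', 'travel': 'preferred',
--                   'finance': 'acceptable'},
--     'tiktok':    {'fashion': 'preferred', 'food': 'preferred', 'tech': 'acceptable',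
--                   'beauty': 'preferred', 'home': 'acceptable', 'travel': 'preferred',
--                   'finance': 'poor_fit'},
--     'pinterest': {'fashion': 'preferred', 'food': 'acceptable', 'tech': 'poor_fit',
--                   'beauty': 'acceptable', 'home': 'preferred', 'travel': 'acceptable',
--                   'finance': 'poor_fit'},
--     'facebook':  {'fashion': 'acceptable', 'food': 'acceptable', 'tech': 'acceptable',
--                   'beauty': 'acceptable', 'home': 'acceptable', 'travel': 'acceptable',
--                   'finance': 'acceptable'},
--     'youtube':   {'fashion': 'acceptable', 'food': 'preferred', 'tech': 'preferred',
--                   'beauty': 'preferred', 'home': 'preferred', 'travel': 'preferred',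
--                   'finance': 'preferred'},
--     'twitter':   {'fashion': 'acceptable', 'food': 'acceptable', 'tech': 'preferred',
--                   'beauty': 'acceptable', 'home': 'acceptable', 'travel': 'acceptable',
--                   'finance': 'preferred'},
--     'linkedin':  {'fashion': 'poor_fit', 'food': 'poor_fit', 'tech': 'preferred',
--                   'beauty': 'poor_fit', 'home': 'poor_fit', 'travel': 'poor_fit',
--                   'finance': 'preferred'},
-- }
--
-- # Preferred-platform list per known industry (for the "Consider:" message).
-- _PREFERRED = {
--     'fashion': ['instagram', 'tiktok', 'pinterest'],
--     'food':    ['instagram', 'tiktok', 'youtube'],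
--     'tech':    ['youtube', 'twitter', 'linkedin'],
--     'beauty':  ['instagram', 'tiktok', 'youtube'],
--     'home':    ['instagram', 'pinterest', 'youtube'],
--     'travel':  ['instagram', 'youtube', 'tiktok'],
--     'finance': ['linkedin', 'youtube', 'twitter'],
-- }
--
--
-- def _validate_industry_platform_match(industry: str, platforms: List[str]) -> List[str]:
--     """Validate industry matches appropriate social media platforms."""
--     if not platforms:
--         return ["At least one platform must be specified"]
--
--     lowered = [p.lower() for p in platforms]
--
--     # Group the platforms by their category for this industry (one lookup each).
--     cats = {'preferred': [], 'acceptable': [], 'poor_fit': []}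
--     for q in lowered:
--         c = _PLATFORM_CATEGORY.get(q, {}).get(industry)
--         if c is not None:
--             cats[c].append(q)
--
--     issues = []
--     if industry in _PREFERRED:
--         if cats['poor_fit']:
--             issues.append(f"Platform(s) {cats['poor_fit']} are poor fit for {industry} industry")
--         if not cats['preferred'] and not cats['acceptable']:
--             issues.append(f"No suitable platforms for {industry} industry. Consider: {_PREFERRED[industry]}")
--     if 'linkedin' in lowered and industry not in ['tech', 'finance', 'business']:
--         issues.append("LinkedIn typically not effective for consumer-focused industries")
--     if 'tiktok' in lowered and industry == 'finance':
--         issues.append("TikTok generally not suitable for financial services content")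
--     return issues
-- ===== Notes on version B (the rewrite author's own statement) =====
-- stated objective: alternative
-- what changed: Replaces A's industry-keyed rule table with three category lists (scanned by three comprehensions plus two extra membership tests) by an inverted platform-keyed index (platform -> industry -> category): each platform is classified by one dict lookup and the platforms are grouped by category in a single pass; the messages are then emitted from the groups.
import Mathlib
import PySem

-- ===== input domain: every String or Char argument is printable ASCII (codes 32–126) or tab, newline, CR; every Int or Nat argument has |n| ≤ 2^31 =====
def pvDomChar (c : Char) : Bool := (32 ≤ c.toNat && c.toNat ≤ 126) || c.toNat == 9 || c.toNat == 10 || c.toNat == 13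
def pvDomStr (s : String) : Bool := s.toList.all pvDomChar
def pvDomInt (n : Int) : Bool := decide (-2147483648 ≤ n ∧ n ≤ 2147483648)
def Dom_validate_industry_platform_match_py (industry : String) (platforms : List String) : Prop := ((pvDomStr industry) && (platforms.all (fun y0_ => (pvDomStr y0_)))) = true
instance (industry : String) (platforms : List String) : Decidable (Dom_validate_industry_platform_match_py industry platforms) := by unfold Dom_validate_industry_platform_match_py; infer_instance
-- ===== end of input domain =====

-- B replaces A's per-industry rule lists and their repeated membership scans by an INVERTED
-- platform-keyed index (platform → industry → category): one dict lookup classifies each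
-- platform, and the platforms are grouped by category in a single pass (objective: alternative).

-- Python repr of a str (exact for the printable-ASCII + tab/newline/CR domain):
-- quote choice, backslash doubling, quote/tab/newline/CR escapes
def pyStrRepr (s : String) : String :=
  let cs := s.toList
  let q : Char := if cs.contains '\'' && !cs.contains '"' then '"' else '\''
  String.ofList [q] ++
    String.join (cs.map (fun c =>
      if c = '\\' then "\\\\"
      else if c = q then String.ofList ['\\', q]
      else if c = '\t' then "\\t"
      else if c = '\n' then "\\n"
      else if c = '\r' then "\\r"
      else String.ofList [c])) ++
  String.ofList [q]

-- Python str(list-of-str), e.g. "['linkedin', 'tiktok']"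
def pyStrListRepr (l : List String) : String :=
  "[" ++ String.intercalate ", " (l.map pyStrRepr) ++ "]"

-- ===== PORT A =====
-- A's industry → (preferred, acceptable, poor_fit) table
def pvRules : PySem.Dict String (List String × List String × List String) :=
  PySem.Dict.mk
  [ ("fashion", (["instagram", "tiktok", "pinterest"], ["facebook", "youtube", "twitter"], ["linkedin"])),
    ("food",    (["instagram", "tiktok", "youtube"], ["facebook", "pinterest", "twitter"], ["linkedin"])),
    ("tech",    (["youtube", "twitter", "linkedin"], ["instagram", "tiktok", "facebook"], ["pinterest"])),
    ("beauty",  (["instagram", "tiktok", "youtube"], ["pinterest", "facebook", "twitter"], ["linkedin"])),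
    ("home",    (["instagram", "pinterest", "youtube"], ["facebook", "tiktok", "twitter"], ["linkedin"])),
    ("travel",  (["instagram", "youtube", "tiktok"], ["facebook", "pinterest", "twitter"], ["linkedin"])),
    ("finance", (["linkedin", "youtube", "twitter"], ["facebook", "instagram"], ["tiktok", "pinterest"])) ]

def validate_industry_platform_match_py (industry : String) (platforms : List String) : List String :=
  let issues : List String := []
  if platforms = [] then
    issues ++ ["At least one platform must be specified"]
  else
    let platforms_lower := platforms.map PySem.Str.lower
    let issues :=
      match PySem.Dict.get? pvRules industry with
      | some rules =>
        let poor_platforms := platforms_lower.filter (fun p => rules.2.2.contains p)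
        let issues :=
          if poor_platforms ≠ [] then
            issues ++ ["Platform(s) " ++ pyStrListRepr poor_platforms ++ " are poor fit for " ++ industry ++ " industry"]
          else issues
        let preferred_platforms := platforms_lower.filter (fun p => rules.1.contains p)
        let acceptable_platforms := platforms_lower.filter (fun p => rules.2.1.contains p)
        if preferred_platforms = [] ∧ acceptable_platforms = [] then
          issues ++ ["No suitable platforms for " ++ industry ++ " industry. Consider: " ++ pyStrListRepr rules.1]
        else issues
      | none => issues
    let issues :=
      if platforms_lower.contains "linkedin" && !(["tech", "finance", "business"].contains industry) then
        issues ++ ["LinkedIn typically not effective for consumer-focused industries"]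
      else issues
    if platforms_lower.contains "tiktok" && industry == "finance" then
      issues ++ ["TikTok generally not suitable for financial services content"]
    else issues

-- ===== PORT B =====
-- B's inverted index: platform → (industry → category)
def pvCat : PySem.Dict String (PySem.Dict String String) :=
  PySem.Dict.mk
  [ ("instagram", PySem.Dict.mk [("fashion", "preferred"), ("food", "preferred"), ("tech", "acceptable"), ("beauty", "preferred"), ("home", "preferred"), ("travel", "preferred"), ("finance", "acceptable")]),
    ("tiktok", PySem.Dict.mk [("fashion", "preferred"), ("food", "preferred"), ("tech", "acceptable"), ("beauty", "preferred"), ("home", "acceptable"), ("travel", "preferred"), ("finance", "poor_fit")]),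
    ("pinterest", PySem.Dict.mk [("fashion", "preferred"), ("food", "acceptable"), ("tech", "poor_fit"), ("beauty", "acceptable"), ("home", "preferred"), ("travel", "acceptable"), ("finance", "poor_fit")]),
    ("facebook", PySem.Dict.mk [("fashion", "acceptable"), ("food", "acceptable"), ("tech", "acceptable"), ("beauty", "acceptable"), ("home", "acceptable"), ("travel", "acceptable"), ("finance", "acceptable")]),
    ("youtube", PySem.Dict.mk [("fashion", "acceptable"), ("food", "preferred"), ("tech", "preferred"), ("beauty", "preferred"), ("home", "preferred"), ("travel", "preferred"), ("finance", "preferred")]),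
    ("twitter", PySem.Dict.mk [("fashion", "acceptable"), ("food", "acceptable"), ("tech", "preferred"), ("beauty", "acceptable"), ("home", "acceptable"), ("travel", "acceptable"), ("finance", "preferred")]),
    ("linkedin", PySem.Dict.mk [("fashion", "poor_fit"), ("food", "poor_fit"), ("tech", "preferred"), ("beauty", "poor_fit"), ("home", "poor_fit"), ("travel", "poor_fit"), ("finance", "preferred")]) ]

-- B's preferred-platform list per known industry
def pvPreferredD : PySem.Dict String (List String) :=
  PySem.Dict.mk
  [ ("fashion", ["instagram", "tiktok", "pinterest"]),
    ("food",    ["instagram", "tiktok", "youtube"]),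
    ("tech",    ["youtube", "twitter", "linkedin"]),
    ("beauty",  ["instagram", "tiktok", "youtube"]),
    ("home",    ["instagram", "pinterest", "youtube"]),
    ("travel",  ["instagram", "youtube", "tiktok"]),
    ("finance", ["linkedin", "youtube", "twitter"]) ]

-- loop body of B: classify q by the inverted-index lookup and append it to its category's group
def pvStepB (industry : String) (cats : PySem.Dict String (List String)) (q : String) :
    PySem.Dict String (List String) :=
  match PySem.Dict.get? (PySem.Dict.getD pvCat q PySem.Dict.empty) industry with
  | some c => PySem.Dict.modify cats c [] (fun l => l ++ [q])
  | none => cats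

def validate_industry_platform_match_py_alt (industry : String) (platforms : List String) : List String :=
  if platforms = [] then
    ["At least one platform must be specified"]
  else
    let lowered := platforms.map PySem.Str.lower
    -- cats = {'preferred': [], 'acceptable': [], 'poor_fit': []}; one grouping pass
    let cats := lowered.foldl (pvStepB industry)
      (PySem.Dict.mk [("preferred", []), ("acceptable", []), ("poor_fit", [])])
    let issues : List String :=
      if PySem.Dict.contains pvPreferredD industry then
        (if PySem.Dict.getD cats "poor_fit" [] ≠ [] then
           ["Platform(s) " ++ pyStrListRepr (PySem.Dict.getD cats "poor_fit" []) ++ " are poor fit for " ++ industry ++ " industry"]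
         else []) ++
        (if PySem.Dict.getD cats "preferred" [] = [] ∧ PySem.Dict.getD cats "acceptable" [] = [] then
           ["No suitable platforms for " ++ industry ++ " industry. Consider: " ++ pyStrListRepr (PySem.Dict.getD pvPreferredD industry [])]
         else [])
      else []
    let issues :=
      issues ++
        (if lowered.contains "linkedin" && !(["tech", "finance", "business"].contains industry) then
           ["LinkedIn typically not effective for consumer-focused industries"]
         else [])
    issues ++
      (if lowered.contains "tiktok" && industry == "finance" then
         ["TikTok generally not suitable for financial services content"]
       else [])

-- ===== PRECONDITION & SPEC =====
def Spec_validate_industry_platform_match_py (industry : String) (platforms : List String) (out : List String) : Prop := out = validate_industry_platform_match_py_alt industry platforms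
instance (industry : String) (platforms : List String) (out : List String) : Decidable (Spec_validate_industry_platform_match_py industry platforms out) := by unfold Spec_validate_industry_platform_match_py; infer_instance

-- ===== CLAIM =====
def Claim_equal_validate_industry_platform_match_py : Prop := ∀ (industry : String) (platforms : List String), Dom_validate_industry_platform_match_py industry platforms → Spec_validate_industry_platform_match_py industry platforms (validate_industry_platform_match_py industry platforms)

-- ===== LEMMAS AND PROOFS =====

-- B's preferred table agrees with the first component of A's rule table
theorem pvPref_eq (industry : String) :
    PySem.Dict.get? pvPreferredD industry = (PySem.Dict.get? pvRules industry).map (fun r => r.1) := by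
  by_cases h1 : industry = "fashion"; · subst h1; rfl
  by_cases h2 : industry = "food"; · subst h2; rfl
  by_cases h3 : industry = "tech"; · subst h3; rfl
  by_cases h4 : industry = "beauty"; · subst h4; rfl
  by_cases h5 : industry = "home"; · subst h5; rfl
  by_cases h6 : industry = "travel"; · subst h6; rfl
  by_cases h7 : industry = "finance"; · subst h7; rfl
  simp [pvPreferredD, pvRules, PySem.Dict.get?, Ne.symm h1, Ne.symm h2, Ne.symm h3, Ne.symm h4, Ne.symm h5, Ne.symm h6, Ne.symm h7]

-- the inverted-index lookup classifies q exactly as A's three rule lists do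
theorem pvCat_char (industry q : String) (r : List String × List String × List String)
    (hr : PySem.Dict.get? pvRules industry = some r) :
    ((PySem.Dict.get? (PySem.Dict.getD pvCat q PySem.Dict.empty) industry == some "poor_fit") = r.2.2.contains q)
    ∧ ((PySem.Dict.get? (PySem.Dict.getD pvCat q PySem.Dict.empty) industry == some "preferred") = r.1.contains q)
    ∧ ((PySem.Dict.get? (PySem.Dict.getD pvCat q PySem.Dict.empty) industry == some "acceptable") = r.2.1.contains q) := by
  by_cases h1 : industry = "fashion"
  · subst h1
    simp [pvRules, PySem.Dict.get?] at hr
    subst hr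
    by_cases g1 : q = "instagram"; · subst g1; decide
    by_cases g2 : q = "tiktok"; · subst g2; decide
    by_cases g3 : q = "pinterest"; · subst g3; decide
    by_cases g4 : q = "facebook"; · subst g4; decide
    by_cases g5 : q = "youtube"; · subst g5; decide
    by_cases g6 : q = "twitter"; · subst g6; decide
    by_cases g7 : q = "linkedin"; · subst g7; decide
    simp [pvCat, PySem.Dict.getD, PySem.Dict.get?, PySem.Dict.empty, Ne.symm g1, Ne.symm g2, Ne.symm g3, Ne.symm g4, Ne.symm g5, Ne.symm g6, Ne.symm g7, g1, g2, g3, g4, g5, g6, g7]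
  by_cases h2 : industry = "food"
  · subst h2
    simp [pvRules, PySem.Dict.get?] at hr
    subst hr
    by_cases g1 : q = "instagram"; · subst g1; decide
    by_cases g2 : q = "tiktok"; · subst g2; decide
    by_cases g3 : q = "pinterest"; · subst g3; decide
    by_cases g4 : q = "facebook"; · subst g4; decide
    by_cases g5 : q = "youtube"; · subst g5; decide
    by_cases g6 : q = "twitter"; · subst g6; decide
    by_cases g7 : q = "linkedin"; · subst g7; decide
    simp [pvCat, PySem.Dict.getD, PySem.Dict.get?, PySem.Dict.empty, Ne.symm g1, Ne.symm g2, Ne.symm g3, Ne.symm g4, Ne.symm g5, Ne.symm g6, Ne.symm g7, g1, g2, g3, g4, g5, g6, g7]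
  by_cases h3 : industry = "tech"
  · subst h3
    simp [pvRules, PySem.Dict.get?] at hr
    subst hr
    by_cases g1 : q = "instagram"; · subst g1; decide
    by_cases g2 : q = "tiktok"; · subst g2; decide
    by_cases g3 : q = "pinterest"; · subst g3; decide
    by_cases g4 : q = "facebook"; · subst g4; decide
    by_cases g5 : q = "youtube"; · subst g5; decide
    by_cases g6 : q = "twitter"; · subst g6; decide
    by_cases g7 : q = "linkedin"; · subst g7; decide
    simp [pvCat, PySem.Dict.getD, PySem.Dict.get?, PySem.Dict.empty, Ne.symm g1, Ne.symm g2, Ne.symm g3, Ne.symm g4, Ne.symm g5, Ne.symm g6, Ne.symm g7, g1, g2, g3, g4, g5, g6, g7]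
  by_cases h4 : industry = "beauty"
  · subst h4
    simp [pvRules, PySem.Dict.get?] at hr
    subst hr
    by_cases g1 : q = "instagram"; · subst g1; decide
    by_cases g2 : q = "tiktok"; · subst g2; decide
    by_cases g3 : q = "pinterest"; · subst g3; decide
    by_cases g4 : q = "facebook"; · subst g4; decide
    by_cases g5 : q = "youtube"; · subst g5; decide
    by_cases g6 : q = "twitter"; · subst g6; decide
    by_cases g7 : q = "linkedin"; · subst g7; decide
    simp [pvCat, PySem.Dict.getD, PySem.Dict.get?, PySem.Dict.empty, Ne.symm g1, Ne.symm g2, Ne.symm g3, Ne.symm g4, Ne.symm g5, Ne.symm g6, Ne.symm g7, g1, g2, g3, g4, g5, g6, g7]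
  by_cases h5 : industry = "home"
  · subst h5
    simp [pvRules, PySem.Dict.get?] at hr
    subst hr
    by_cases g1 : q = "instagram"; · subst g1; decide
    by_cases g2 : q = "tiktok"; · subst g2; decide
    by_cases g3 : q = "pinterest"; · subst g3; decide
    by_cases g4 : q = "facebook"; · subst g4; decide
    by_cases g5 : q = "youtube"; · subst g5; decide
    by_cases g6 : q = "twitter"; · subst g6; decide
    by_cases g7 : q = "linkedin"; · subst g7; decide
    simp [pvCat, PySem.Dict.getD, PySem.Dict.get?, PySem.Dict.empty, Ne.symm g1, Ne.symm g2, Ne.symm g3, Ne.symm g4, Ne.symm g5, Ne.symm g6, Ne.symm g7, g1, g2, g3, g4, g5, g6, g7]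
  by_cases h6 : industry = "travel"
  · subst h6
    simp [pvRules, PySem.Dict.get?] at hr
    subst hr
    by_cases g1 : q = "instagram"; · subst g1; decide
    by_cases g2 : q = "tiktok"; · subst g2; decide
    by_cases g3 : q = "pinterest"; · subst g3; decide
    by_cases g4 : q = "facebook"; · subst g4; decide
    by_cases g5 : q = "youtube"; · subst g5; decide
    by_cases g6 : q = "twitter"; · subst g6; decide
    by_cases g7 : q = "linkedin"; · subst g7; decide
    simp [pvCat, PySem.Dict.getD, PySem.Dict.get?, PySem.Dict.empty, Ne.symm g1, Ne.symm g2, Ne.symm g3, Ne.symm g4, Ne.symm g5, Ne.symm g6, Ne.symm g7, g1, g2, g3, g4, g5, g6, g7]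
  by_cases h7 : industry = "finance"
  · subst h7
    simp [pvRules, PySem.Dict.get?] at hr
    subst hr
    by_cases g1 : q = "instagram"; · subst g1; decide
    by_cases g2 : q = "tiktok"; · subst g2; decide
    by_cases g3 : q = "pinterest"; · subst g3; decide
    by_cases g4 : q = "facebook"; · subst g4; decide
    by_cases g5 : q = "youtube"; · subst g5; decide
    by_cases g6 : q = "twitter"; · subst g6; decide
    by_cases g7 : q = "linkedin"; · subst g7; decide
    simp [pvCat, PySem.Dict.getD, PySem.Dict.get?, PySem.Dict.empty, Ne.symm g1, Ne.symm g2, Ne.symm g3, Ne.symm g4, Ne.symm g5, Ne.symm g6, Ne.symm g7, g1, g2, g3, g4, g5, g6, g7]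
  simp [pvRules, PySem.Dict.get?, Ne.symm h1, Ne.symm h2, Ne.symm h3, Ne.symm h4, Ne.symm h5, Ne.symm h6, Ne.symm h7] at hr

-- the grouping fold builds, under each key, the sublist of elements classified to that key
theorem pvFold_groupB (industry : String) (ps : List String)
    (d : PySem.Dict String (List String)) (k : String) :
    PySem.Dict.getD (ps.foldl (pvStepB industry) d) k []
    = PySem.Dict.getD d k [] ++
        ps.filter (fun q => PySem.Dict.get? (PySem.Dict.getD pvCat q PySem.Dict.empty) industry == some k) := by
  induction ps generalizing d with
  | nil => simp
  | cons p ps ih =>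
    simp only [List.foldl_cons, List.filter_cons, pvStepB]
    cases hf : PySem.Dict.get? (PySem.Dict.getD pvCat p PySem.Dict.empty) industry with
    | none => simp [ih]
    | some c =>
      rw [ih]
      by_cases hk : c = k
      · subst hk
        simp
      · simp [PySem.Dict.getD_modify, Ne.symm hk, hk]

-- ===== VERDICT =====
theorem validate_industry_platform_match_py_spec : Claim_equal_validate_industry_platform_match_py := by
  intro industry platforms _
  unfold Spec_validate_industry_platform_match_py
  unfold validate_industry_platform_match_py validate_industry_platform_match_py_alt
  by_cases hp : platforms = []
  · simp [hp]
  · rw [if_neg hp, if_neg hp]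
    cases hr : PySem.Dict.get? pvRules industry with
    | none =>
      have hpn : PySem.Dict.get? pvPreferredD industry = none := by
        rw [pvPref_eq, hr]; rfl
      have hc : PySem.Dict.contains pvPreferredD industry = false :=
        (PySem.Dict.get?_eq_none_iff_contains _ _).mp hpn
      simp only [hc, if_neg Bool.false_ne_true, List.nil_append]
      split_ifs <;> simp
    | some r =>
      have hps : PySem.Dict.get? pvPreferredD industry = some r.1 := by
        rw [pvPref_eq, hr]; rfl
      have hc : PySem.Dict.contains pvPreferredD industry = true := by
        by_cases h : PySem.Dict.contains pvPreferredD industry = true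
        · exact h
        · rw [(PySem.Dict.get?_eq_none_iff_contains _ _).mpr (by simpa using h)] at hps
          cases hps
      have hgd : PySem.Dict.getD pvPreferredD industry [] = r.1 := by
        rw [PySem.Dict.getD_eq_get?_getD, hps]; rfl
      have hchar := fun q => pvCat_char industry q r hr
      have e1 : (platforms.map PySem.Str.lower).filter
            (fun q => PySem.Dict.get? (PySem.Dict.getD pvCat q PySem.Dict.empty) industry == some "poor_fit")
          = (platforms.map PySem.Str.lower).filter (fun p => r.2.2.contains p) :=
        List.filter_congr (fun q _ => (hchar q).1)
      have e2 : (platforms.map PySem.Str.lower).filter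
            (fun q => PySem.Dict.get? (PySem.Dict.getD pvCat q PySem.Dict.empty) industry == some "preferred")
          = (platforms.map PySem.Str.lower).filter (fun p => r.1.contains p) :=
        List.filter_congr (fun q _ => (hchar q).2.1)
      have e3 : (platforms.map PySem.Str.lower).filter
            (fun q => PySem.Dict.get? (PySem.Dict.getD pvCat q PySem.Dict.empty) industry == some "acceptable")
          = (platforms.map PySem.Str.lower).filter (fun p => r.2.1.contains p) :=
        List.filter_congr (fun q _ => (hchar q).2.2)
      simp only [hc, pvFold_groupB, e1, e2, e3, hgd, List.nil_append]
      clear hchar hps hr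
      have i1 : PySem.Dict.getD (PySem.Dict.mk [("preferred", ([] : List String)), ("acceptable", []), ("poor_fit", [])]) "poor_fit" [] = [] := rfl
      have i2 : PySem.Dict.getD (PySem.Dict.mk [("preferred", ([] : List String)), ("acceptable", []), ("poor_fit", [])]) "preferred" [] = [] := rfl
      have i3 : PySem.Dict.getD (PySem.Dict.mk [("preferred", ([] : List String)), ("acceptable", []), ("poor_fit", [])]) "acceptable" [] = [] := rfl
      simp only [i1, i2, i3, List.nil_append]
      split_ifs <;> simp
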